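-- pv_equiv track=rewrite | github.com/Kapack/WeekList | lib/CreateImage/Shopify/Shopify.py | consolidateField
-- ===== SOURCE A (Python) =====
-- def consolidateField(dataDict:dict) -> dict:
--     # Creating a list with all the skus
--     skus = []
--     for headers in dataDict:
--         if headers.lower() == 'sku':
--             for sku in dataDict[headers]:
--                 skus.append(dataDict[headers][sku])
--
--     # Removing duplicates from skus[], and make them to dict keys
--     images = dict.fromkeys(skus)
--     # Giving a list as value
--     for sku in images:
--         images[sku] = list()
--
--     # Appending Images
--     for headers in dataDict:
--         if headers.lower() == 'image_url':
--             # Looping trough each image_url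
--             for image in dataDict[headers]:
--                 # looping through each sku
--                 for sku in images.keys():
--                     # image_url without -X.jpg. If that matches sku
--                     if dataDict[headers][image].rsplit('-', 1)[0] == sku:
--                         # Append to dict
--                         images[sku].append(dataDict[headers][image])
--     # Return
--     return images
-- ===== SOURCE B (Python) =====
-- def consolidateField(dataDict: dict) -> dict:
--     # One pass over image URLs building a prefix -> [urls] index, then the
--     # result is assembled by a pass over the SKU values (deduped first-seen).
--     index = {}
--     for header, inner in dataDict.items():
--         if header.lower() == 'image_url':
--             for url in inner.values():
--                 index.setdefault(url.rsplit('-', 1)[0], []).append(url)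
--     result = {}
--     for header, inner in dataDict.items():
--         if header.lower() == 'sku':
--             for sku in inner.values():
--                 if sku not in result:
--                     result[sku] = index.get(sku, [])
--     return result
-- ===== Notes on version B (the rewrite author's own statement) =====
-- stated objective: alternative
-- what changed: Replaces A's per-image inner scan over all SKU keys with a one-pass prefix index (setdefault grouping) over the image URLs, then assembles the result by a pass over the deduped SKU values looking each up in the index.
import Mathlib
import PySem

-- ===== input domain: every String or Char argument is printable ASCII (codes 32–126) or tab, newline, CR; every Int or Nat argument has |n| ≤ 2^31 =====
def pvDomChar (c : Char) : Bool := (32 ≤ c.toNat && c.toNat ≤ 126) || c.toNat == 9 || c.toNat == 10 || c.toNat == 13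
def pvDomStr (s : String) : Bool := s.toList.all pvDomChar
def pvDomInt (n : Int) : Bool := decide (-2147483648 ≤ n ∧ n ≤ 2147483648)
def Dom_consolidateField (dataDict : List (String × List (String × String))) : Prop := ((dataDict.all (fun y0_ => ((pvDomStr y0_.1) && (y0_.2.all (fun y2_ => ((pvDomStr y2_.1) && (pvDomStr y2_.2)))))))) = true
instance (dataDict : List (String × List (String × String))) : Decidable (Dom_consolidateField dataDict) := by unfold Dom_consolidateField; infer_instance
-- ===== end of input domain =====

-- B replaces A's per-image scan over all SKU keys with a one-pass prefix index over the
-- image URLs plus a pass over the deduped SKU values (objective: alternative; return value only).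

-- shared helper: url.rsplit('-', 1)[0] — the part before the LAST '-', or the whole string
-- (exact: rfind gives the highest index of '-', take everything before it)
def pvPrefix (s : String) : String :=
  let r := PySem.Str.rfind s "-"
  if r == -1 then s else String.ofList (s.toList.take r.toNat)

-- ===== PORT A =====
def consolidateField (dataDict : List (String × List (String × String))) : List (String × List String) :=
  -- skus = [] ; for headers in dataDict: if headers.lower()=='sku': for sku in …: skus.append(…)
  let skus : List String :=
    dataDict.foldl (fun skus h =>
      if PySem.Str.lower h.1 == "sku" then
        h.2.foldl (fun skus p => skus ++ [p.2]) skus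
      else skus) []
  -- images = dict.fromkeys(skus); for sku in images: images[sku] = list()  — each key gets []
  let images0 : PySem.Dict String (List String) :=
    skus.foldl (fun d s => d.insert s []) PySem.Dict.empty
  -- for headers …: if …=='image_url': for image in …: for sku in images.keys(): if rsplit==sku: append
  let images : PySem.Dict String (List String) :=
    dataDict.foldl (fun images h =>
      if PySem.Str.lower h.1 == "image_url" then
        h.2.foldl (fun images p =>
          (PySem.Dict.keys images).foldl (fun d s =>
            if pvPrefix p.2 == s then d.modify s [] (fun l => l ++ [p.2]) else d) images) images
      else images) images0
  images.items

-- ===== PORT B =====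
def consolidateField_alt (dataDict : List (String × List (String × String))) : List (String × List String) :=
  -- index = {}; for header, inner …: if 'image_url': for url …: index.setdefault(prefix, []).append(url)
  let index : PySem.Dict String (List String) :=
    dataDict.foldl (fun index h =>
      if PySem.Str.lower h.1 == "image_url" then
        h.2.foldl (fun index p =>
          index.modify (pvPrefix p.2) [] (fun l => l ++ [p.2])) index
      else index) PySem.Dict.empty
  -- result = {}; for header, inner …: if 'sku': for sku …: if sku not in result: result[sku] = index.get(sku, [])
  let result : PySem.Dict String (List String) :=
    dataDict.foldl (fun result h =>
      if PySem.Str.lower h.1 == "sku" then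
        h.2.foldl (fun result p =>
          if result.contains p.2 then result
          else result.insert p.2 (index.getD p.2 [])) result
      else result) PySem.Dict.empty
  result.items

-- ===== PRECONDITION & SPEC =====
def Spec_consolidateField (dataDict : List (String × List (String × String))) (out : List (String × List String)) : Prop := out = consolidateField_alt dataDict
instance (dataDict : List (String × List (String × String))) (out : List (String × List String)) : Decidable (Spec_consolidateField dataDict out) := by unfold Spec_consolidateField; infer_instance

-- ===== CLAIM (what is proved, stated in full; the proofs are below) =====
def Claim_equal_consolidateField : Prop := ∀ (dataDict : List (String × List (String × String))), Dom_consolidateField dataDict → Spec_consolidateField dataDict (consolidateField dataDict)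

-- ===== LEMMAS AND PROOFS =====

-- the inner values of all headers satisfying `cond`, in traversal order
def pvVals (cond : String → Bool) (dataDict : List (String × List (String × String))) : List String :=
  dataDict.foldl (fun acc h => if cond h.1 then acc ++ h.2.map Prod.snd else acc) []

theorem pvVals_acc (cond : String → Bool) :
    ∀ (d : List (String × List (String × String))) (acc : List String),
    d.foldl (fun acc h => if cond h.1 then acc ++ h.2.map Prod.snd else acc) acc
      = acc ++ pvVals cond d := by
  intro d
  induction d with
  | nil => intro acc; simp [pvVals]
  | cons h t ih =>
      intro acc
      simp only [pvVals, List.foldl_cons] at *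
      rw [ih, ih (if cond h.1 then [] ++ h.2.map Prod.snd else [])]
      by_cases hc : cond h.1 <;> simp [hc]

-- flattening: a fold over headers with an inner fold over values = a fold over pvVals
theorem pvFlat {σ : Type} (cond : String → Bool) (step : σ → String → σ) :
    ∀ (d : List (String × List (String × String))) (st : σ),
    d.foldl (fun st h => if cond h.1 then h.2.foldl (fun st p => step st p.2) st else st) st
      = (pvVals cond d).foldl step st := by
  intro d
  induction d with
  | nil => intro st; simp [pvVals]
  | cons h t ih =>
      intro st
      simp only [List.foldl_cons]
      rw [ih]
      have hv : pvVals cond (h :: t)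
          = (if cond h.1 then h.2.map Prod.snd else []) ++ pvVals cond t := by
        simp only [pvVals, List.foldl_cons]
        rw [pvVals_acc]
        by_cases hc : cond h.1 <;> simp [hc, pvVals]
      rw [hv, List.foldl_append]
      by_cases hc : cond h.1 <;> simp only [hc, if_true, List.foldl_map] <;> rfl

theorem pvFoldAppend : ∀ (l acc : List String),
    l.foldl (fun a v => a ++ [v]) acc = acc ++ l := by
  intro l
  induction l with
  | nil => simp
  | cons x t ih => intro acc; simp [ih]

-- the inner 'for sku in images.keys()' scan: at most one key matches the prefix
theorem pvScan (p v : String) :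
    ∀ (ks : List String) (d : PySem.Dict String (List String)), ks.Nodup →
    ks.foldl (fun d s => if p == s then d.modify s [] (fun l => l ++ [v]) else d) d
      = if p ∈ ks then d.modify p [] (fun l => l ++ [v]) else d := by
  have aux : ∀ (ks : List String) (d : PySem.Dict String (List String)), p ∉ ks →
      ks.foldl (fun d s => if p == s then d.modify s [] (fun l => l ++ [v]) else d) d = d := by
    intro ks
    induction ks with
    | nil => intro d _; rfl
    | cons k t ih =>
        intro d hp
        have h1 : p ≠ k := fun h => hp (h ▸ List.mem_cons_self)
        have h2 : p ∉ t := fun h => hp (List.mem_cons_of_mem _ h)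
        rw [List.foldl_cons, if_neg (by simp [h1])]
        exact ih d h2
  intro ks
  induction ks with
  | nil => intro d _; simp
  | cons k t ih =>
      intro d hnd
      rcases List.nodup_cons.mp hnd with ⟨hk, hnt⟩
      by_cases hp : p = k
      · subst hp
        rw [List.foldl_cons, if_pos (by simp), if_pos List.mem_cons_self]
        exact aux t _ hk
      · rw [List.foldl_cons, if_neg (by simp [hp]), ih d hnt]
        simp [List.mem_cons, hp]

-- A's image loop keeps the key list unchanged
theorem pvLoopKeys :
    ∀ (vs : List String) (d : PySem.Dict String (List String)), d.keys.Nodup →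
    (vs.foldl (fun d v =>
        (PySem.Dict.keys d).foldl (fun d' s =>
          if pvPrefix v == s then d'.modify s [] (fun l => l ++ [v]) else d') d) d).keys = d.keys := by
  intro vs
  induction vs with
  | nil => intro d _; rfl
  | cons v t ih =>
      intro d hnd
      simp only [List.foldl_cons]
      rw [pvScan _ _ _ _ hnd]
      by_cases hm : pvPrefix v ∈ d.keys
      · have hc : d.contains (pvPrefix v) = true := (PySem.Dict.contains_iff_mem_keys d _).mpr hm
        have hkeys : (d.modify (pvPrefix v) [] (fun l => l ++ [v])).keys = d.keys := by
          rw [PySem.Dict.keys_modify, PySem.Dict.keys_insert_of_contains _ _ hc]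
        rw [if_pos hm, ih _ (hkeys ▸ hnd), hkeys]
      · rw [if_neg hm]; exact ih d hnd

-- A's image loop: each key accumulates exactly the matching images, in order
theorem pvLoopGetD :
    ∀ (vs : List String) (d : PySem.Dict String (List String)) (k : String),
    d.keys.Nodup → k ∈ d.keys →
    (vs.foldl (fun d v =>
        (PySem.Dict.keys d).foldl (fun d' s =>
          if pvPrefix v == s then d'.modify s [] (fun l => l ++ [v]) else d') d) d).getD k []
      = d.getD k [] ++ vs.filter (fun v => pvPrefix v == k) := by
  intro vs
  induction vs with
  | nil => intro d k _ _; simp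
  | cons v t ih =>
      intro d k hnd hk
      simp only [List.foldl_cons]
      rw [pvScan _ _ _ _ hnd]
      by_cases hm : pvPrefix v ∈ d.keys
      · have hc : d.contains (pvPrefix v) = true := (PySem.Dict.contains_iff_mem_keys d _).mpr hm
        have hkeys : (d.modify (pvPrefix v) [] (fun l => l ++ [v])).keys = d.keys := by
          rw [PySem.Dict.keys_modify, PySem.Dict.keys_insert_of_contains _ _ hc]
        rw [if_pos hm, ih _ k (hkeys ▸ hnd) (hkeys ▸ hk)]
        rw [PySem.Dict.getD_modify]
        by_cases he : k = pvPrefix v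
        · simp [he]
        · have : ¬ (pvPrefix v == k) = true := by simp [beq_iff_eq]; exact fun h => he h.symm
          simp [he, this]
      · rw [if_neg hm, ih d k hnd hk]
        have he : ¬ k = pvPrefix v := fun h => hm (h ▸ hk)
        have : ¬ (pvPrefix v == k) = true := by simp [beq_iff_eq]; exact fun h => he h.symm
        simp [this]

-- dict.fromkeys + list(): every key reads as []
theorem pvFromkeysGetD :
    ∀ (xs : List String) (d : PySem.Dict String (List String)),
    (∀ k, d.getD k [] = []) →
    ∀ k, (xs.foldl (fun d s => d.insert s ([] : List String)) d).getD k [] = [] := by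
  intro xs
  induction xs with
  | nil => intro d h k; exact h k
  | cons x t ih =>
      intro d h k
      simp only [List.foldl_cons]
      refine ih _ (fun k' => ?_) k
      rw [PySem.Dict.getD_insert]
      split_ifs with h' <;> simp [h]

-- B's index: lookup = the matching images, in order
theorem pvIndexGetD :
    ∀ (vs : List String) (idx : PySem.Dict String (List String)) (k : String),
    (vs.foldl (fun i v => i.modify (pvPrefix v) [] (fun l => l ++ [v])) idx).getD k []
      = idx.getD k [] ++ vs.filter (fun v => pvPrefix v == k) := by
  intro vs
  induction vs with
  | nil => intro idx k; simp
  | cons v t ih =>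
      intro idx k
      simp only [List.foldl_cons]
      rw [ih, PySem.Dict.getD_modify]
      by_cases he : k = pvPrefix v
      · simp [he]
      · have : ¬ (pvPrefix v == k) = true := by simp [beq_iff_eq]; exact fun h => he h.symm
        simp [he, this]

-- B's result loop builds exactly the first-occurrence-deduped sku list, each with its index lookup
theorem pvResultItems (index : PySem.Dict String (List String)) :
    ∀ (sk : List String) (res : PySem.Dict String (List String)),
    res.keys.Nodup →
    res.items = res.keys.map (fun s => (s, index.getD s [])) →
    (sk.foldl (fun res s =>
        if res.contains s then res else res.insert s (index.getD s [])) res).items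
      = (PySem.Set.update res.keys sk).map (fun s => (s, index.getD s [])) := by
  intro sk
  induction sk with
  | nil => intro res _ hit; exact hit
  | cons s t ih =>
      intro res hnd hit
      simp only [List.foldl_cons]
      have hupd : PySem.Set.update res.keys (s :: t) = PySem.Set.update (PySem.Set.add res.keys s) t := rfl
      by_cases hc : res.contains s = true
      · have hsm : s ∈ res.keys := (PySem.Dict.contains_iff_mem_keys res s).mp hc
        have hadd : PySem.Set.add res.keys s = res.keys := by
          simp [PySem.Set.add, hsm]
        rw [if_pos hc, hupd, hadd]
        exact ih res hnd hit
      · have hc' : res.contains s = false := by simp_all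
        have hs : s ∉ res.keys := fun h => by
          rw [(PySem.Dict.contains_iff_mem_keys res s).mpr h] at hc'
          exact absurd hc' (by simp)
        have hadd : PySem.Set.add res.keys s = res.keys ++ [s] := by
          simp [PySem.Set.add, hs]
        have hkeys : (res.insert s (index.getD s [])).keys = res.keys ++ [s] :=
          PySem.Dict.keys_insert_of_not_contains res _ hc'
        have hnd' : (res.insert s (index.getD s [])).keys.Nodup := by
          rw [hkeys]
          simpa using List.Nodup.append hnd (List.nodup_singleton s)
            (by simpa [List.disjoint_singleton] using hs)
        have hit' : (res.insert s (index.getD s [])).items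
            = (res.insert s (index.getD s [])).keys.map (fun s' => (s', index.getD s' [])) := by
          rw [PySem.Dict.items_insert_of_not_contains res _ hc', hit, hkeys]
          simp
        rw [if_neg (by simp [hc']), hupd, hadd, ← hkeys]
        exact ih _ hnd' hit'

-- assembling the two sides
theorem pvUpdateNil (l : List String) :
    PySem.Set.update ([] : List String) l = PySem.Set.ofList l := by
  rw [PySem.Set.ofList_eq_foldl]; rfl

theorem pvMain (d : List (String × List (String × String))) :
    consolidateField d = consolidateField_alt d := by
  have hskus :
      d.foldl (fun skus h => if PySem.Str.lower h.1 == "sku" then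
          h.2.foldl (fun skus p => skus ++ [p.2]) skus else skus) []
        = pvVals (fun x => PySem.Str.lower x == "sku") d :=
    (pvFlat (fun x => PySem.Str.lower x == "sku") (fun (a : List String) v => a ++ [v]) d []).trans
      (by simpa using pvFoldAppend (pvVals (fun x => PySem.Str.lower x == "sku") d) [])
  have himgA : ∀ (d0 : PySem.Dict String (List String)),
      d.foldl (fun images h => if PySem.Str.lower h.1 == "image_url" then
          h.2.foldl (fun images p =>
            (PySem.Dict.keys images).foldl (fun dd s =>
              if pvPrefix p.2 == s then dd.modify s [] (fun l => l ++ [p.2]) else dd) images) images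
        else images) d0
        = (pvVals (fun x => PySem.Str.lower x == "image_url") d).foldl (fun dd v =>
            (PySem.Dict.keys dd).foldl (fun d' s =>
              if pvPrefix v == s then d'.modify s [] (fun l => l ++ [v]) else d') dd) d0 :=
    fun d0 => pvFlat (fun x => PySem.Str.lower x == "image_url")
      (fun dd v => (PySem.Dict.keys dd).foldl (fun d' s =>
        if pvPrefix v == s then d'.modify s [] (fun l => l ++ [v]) else d') dd) d d0
  have hidxB :
      d.foldl (fun index h => if PySem.Str.lower h.1 == "image_url" then
          h.2.foldl (fun index p => index.modify (pvPrefix p.2) [] (fun l => l ++ [p.2])) index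
        else index) PySem.Dict.empty
        = (pvVals (fun x => PySem.Str.lower x == "image_url") d).foldl (fun i v =>
            i.modify (pvPrefix v) [] (fun l => l ++ [v])) PySem.Dict.empty :=
    pvFlat (fun x => PySem.Str.lower x == "image_url")
      (fun (i : PySem.Dict String (List String)) v => i.modify (pvPrefix v) [] (fun l => l ++ [v])) d _
  unfold consolidateField consolidateField_alt
  simp only [hskus, himgA, hidxB]
  set skusv := pvVals (fun x => PySem.Str.lower x == "sku") d with hS
  set vsv := pvVals (fun x => PySem.Str.lower x == "image_url") d with hV
  set IDX := vsv.foldl (fun i v => i.modify (pvPrefix v) [] (fun l => l ++ [v])) PySem.Dict.empty with hI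
  have hresB :
      d.foldl (fun result h => if PySem.Str.lower h.1 == "sku" then
          h.2.foldl (fun result p =>
            if result.contains p.2 then result else result.insert p.2 (IDX.getD p.2 [])) result
        else result) PySem.Dict.empty
        = skusv.foldl (fun res s =>
            if res.contains s then res else res.insert s (IDX.getD s [])) PySem.Dict.empty :=
    pvFlat (fun x => PySem.Str.lower x == "sku")
      (fun (res : PySem.Dict String (List String)) s =>
        if res.contains s then res else res.insert s (IDX.getD s [])) d _
  simp only [hresB]
  set IMG0 := skusv.foldl (fun dd s => dd.insert s ([] : List String)) PySem.Dict.empty with h0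
  have kI : IMG0.keys = PySem.Set.ofList skusv := by
    have h1 : IMG0.keys = PySem.Set.update (PySem.Dict.empty : PySem.Dict String (List String)).keys skusv :=
      PySem.Dict.keys_foldl_insert skusv (fun _ _ => ([] : List String)) PySem.Dict.empty
    rw [h1, PySem.Dict.keys_empty, pvUpdateNil]
  have nod0 : IMG0.keys.Nodup := by rw [kI]; exact PySem.Set.nodup_ofList skusv
  have kA : (vsv.foldl (fun dd v =>
      (PySem.Dict.keys dd).foldl (fun d' s =>
        if pvPrefix v == s then d'.modify s [] (fun l => l ++ [v]) else d') dd) IMG0).keys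
      = PySem.Set.ofList skusv := (pvLoopKeys vsv IMG0 nod0).trans kI
  have nodA : (vsv.foldl (fun dd v =>
      (PySem.Dict.keys dd).foldl (fun d' s =>
        if pvPrefix v == s then d'.modify s [] (fun l => l ++ [v]) else d') dd) IMG0).keys.Nodup := by
    rw [kA]; exact PySem.Set.nodup_ofList skusv
  have itemsA := PySem.Dict.items_eq_map_keys _ nodA ([] : List String)
  have itemsB := pvResultItems IDX skusv PySem.Dict.empty
    (by rw [PySem.Dict.keys_empty]; exact List.nodup_nil) (by rfl)
  rw [itemsA, kA, itemsB, PySem.Dict.keys_empty, pvUpdateNil]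
  refine List.map_congr_left (fun k hk => ?_)
  have hk0 : k ∈ IMG0.keys := by rw [kI]; exact hk
  rw [pvLoopGetD vsv IMG0 k nod0 hk0,
    pvFromkeysGetD skusv PySem.Dict.empty (fun k' => PySem.Dict.getD_empty k' []) k,
    pvIndexGetD vsv PySem.Dict.empty k, PySem.Dict.getD_empty]

-- ===== VERDICT (by name: the statement is the Claim_ definition above) =====
theorem consolidateField_spec : Claim_equal_consolidateField := by
  intro d _
  show consolidateField d = consolidateField_alt d
  exact pvMain d
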